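-- pv_equiv track=rewrite | github.com/keep-shitudy/algorithm | Sehbeom/DidBefore/Programmers/Lv2/220905_SamingQueue/SamingQueue.py | solution
-- ===== SOURCE A (Python) =====
-- from collections import deque
--
-- def solution(queue1, queue2):
--     answer = 0
--
--     len_q1 = len(queue1)
--     len_q2 = len(queue2)
--
--     sum_q1 = sum(queue1)
--     sum_q2 = sum(queue2)
--
--     q1 = deque(queue1)
--     q2 = deque(queue2)
--
--     while len_q1 >= 0 or len_q2 >= 0:
--         if sum_q1 == sum_q2:
--             break
--
--         elif sum_q1 > sum_q2:
--             popped = q1.popleft()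
--             q2.append(popped)
--             sum_q1 -= popped
--             sum_q2 += popped
--             answer += 1
--             len_q1 -= 1
--
--         elif sum_q1 < sum_q2:
--             popped = q2.popleft()
--             q1.append(popped)
--             sum_q2 -= popped
--             sum_q1 += popped
--             answer += 1
--             len_q2 -= 1
--
--     if sum_q1 != sum_q2:
--         answer = -1
--
--     return answer
-- ===== SOURCE B (Python) =====
-- def solution(queue1, queue2):
--     combined = queue1 + queue2
--     n, m = len(queue1), len(queue2)
--     N = n + m
--     total = sum(combined)
--     s = sum(queue1)
--     left, right = 0, n
--     count = 0
--     while (left <= n or right <= n + m) and 2 * s != total: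
--         if 2 * s > total:
--             s -= combined[left % N]
--             left += 1
--         else:
--             s += combined[right % N]
--             right += 1
--         count += 1
--     return count if 2 * s == total else -1
-- ===== Notes on version B (the rewrite author's own statement) =====
-- stated objective: simpler
-- what changed: A's two deques with two running sums and two length counters are replaced by a single fixed combined array walked with two circular indices and one running sum (the target comparison 2*s vs total), a different data representation of the same move process.
-- outside the precondition, e.g. on solution([-1], [-1]): A returns 0, B returns 0
import Mathlib
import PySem

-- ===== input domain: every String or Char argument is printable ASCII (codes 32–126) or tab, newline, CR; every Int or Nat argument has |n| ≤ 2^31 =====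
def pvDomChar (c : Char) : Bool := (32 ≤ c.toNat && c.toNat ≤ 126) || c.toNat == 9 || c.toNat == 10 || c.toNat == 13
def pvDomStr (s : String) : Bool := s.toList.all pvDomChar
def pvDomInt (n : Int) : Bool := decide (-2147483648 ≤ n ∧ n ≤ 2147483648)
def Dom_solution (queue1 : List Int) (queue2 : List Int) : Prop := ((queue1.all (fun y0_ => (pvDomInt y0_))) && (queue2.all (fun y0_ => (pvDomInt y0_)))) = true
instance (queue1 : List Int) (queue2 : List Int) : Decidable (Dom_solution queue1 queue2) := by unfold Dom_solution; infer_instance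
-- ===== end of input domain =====

-- B replaces A's two deques / two sums / two length counters by a single fixed combined
-- array walked with two circular indices and one running sum (simpler; same O(n+m) cost).


-- ===== PORT A =====
-- A's while-loop, step for step: state (q1, q2, sum_q1, sum_q2, len_q1, len_q2, answer).
-- Under Pre_ the loop provably makes at most 2*(len queue1 + len queue2) + 2 iterations,
-- so the fuel supplied by `solution` is never exhausted there (the fuel-0 fallback mirrors
-- the final `if sum_q1 != sum_q2` check).  A pop from an empty deque is Python's
-- IndexError; it can only happen when the combined sum is negative (outside Pre_),
-- and the port returns -1 there.
def loopA (fuel : Nat) (q1 q2 : List Int) (s1 s2 c1 c2 ans : Int) : Int :=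
  match fuel with
  | 0 => if s1 ≠ s2 then -1 else ans
  | f + 1 =>
    if 0 ≤ c1 ∨ 0 ≤ c2 then
      if s1 = s2 then ans
      else if s1 > s2 then
        match q1 with
        | [] => -1  -- IndexError: pop from an empty deque (excluded by Pre_)
        | h :: t => loopA f t (q2 ++ [h]) (s1 - h) (s2 + h) (c1 - 1) c2 (ans + 1)
      else
        match q2 with
        | [] => -1  -- IndexError: pop from an empty deque (excluded by Pre_)
        | h :: t => loopA f (q1 ++ [h]) t (s1 + h) (s2 - h) c1 (c2 - 1) (ans + 1)
    else if s1 ≠ s2 then -1 else ans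

def solution (queue1 : List Int) (queue2 : List Int) : Int :=
  loopA (2 * (queue1.length + queue2.length) + 2) queue1 queue2
    queue1.sum queue2.sum (queue1.length : Int) (queue2.length : Int) 0

-- ===== PORT B =====
-- B's while-loop: fixed list `combined`, circular indices left/right, running sum s.
-- Same fuel as A's port; under Pre_ it is never exhausted (the fallback mirrors the
-- final `return count if 2 * s == total else -1`).
def loopB (fuel : Nat) (combined : List Int) (n m N total s left right count : Int) : Int :=
  match fuel with
  | 0 => if 2 * s = total then count else -1
  | f + 1 =>
    if (left ≤ n ∨ right ≤ n + m) ∧ 2 * s ≠ total then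
      if 2 * s > total then
        loopB f combined n m N total
          (s - PySem.List.pyGetD combined (PySem.Int.mod left N) 0) (left + 1) right (count + 1)
      else
        loopB f combined n m N total
          (s + PySem.List.pyGetD combined (PySem.Int.mod right N) 0) left (right + 1) (count + 1)
    else if 2 * s = total then count else -1

def solution_alt (queue1 : List Int) (queue2 : List Int) : Int :=
  let combined := queue1 ++ queue2
  let n : Int := queue1.length
  let m : Int := queue2.length
  loopB (2 * (queue1.length + queue2.length) + 2) combined n m (n + m)
    combined.sum queue1.sum 0 n 0

-- ===== PRECONDITION & SPEC =====
-- Pre_ excludes inputs whose combined sum is negative: only there can A pop from an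
-- empty deque (IndexError); whether it actually raises depends on the whole move
-- trace, so the sign condition is the closed-form envelope of the raising inputs
-- (on a negative-total input where A still returns, B returns the same value).
def Pre_solution (queue1 : List Int) (queue2 : List Int) : Prop :=
  0 ≤ queue1.sum + queue2.sum
instance (queue1 : List Int) (queue2 : List Int) : Decidable (Pre_solution queue1 queue2) := by
  unfold Pre_solution; infer_instance

def pvWitness_solution : List Int × List Int := ([3, 2, 7, 2], [4, 6, 5, 1])

def Spec_solution (queue1 : List Int) (queue2 : List Int) (out : Int) : Prop :=
  out = solution_alt queue1 queue2
instance (queue1 : List Int) (queue2 : List Int) (out : Int) : Decidable (Spec_solution queue1 queue2 out) := by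
  unfold Spec_solution; infer_instance

-- ===== CLAIM (what is proved, stated in full; the proofs are below) =====
def Claim_equal_solution : Prop := ∀ (queue1 : List Int) (queue2 : List Int), Dom_solution queue1 queue2 → Pre_solution queue1 queue2 → Spec_solution queue1 queue2 (solution queue1 queue2)

-- ===== LEMMAS AND PROOFS =====

-- Index bridge: the head of `combined` rotated by a nonnegative Int index i is
-- exactly Python's combined[i % len(combined)].
lemma getD_mod_rotate_head (combined : List Int) (i x : Int) (xs : List Int)
    (h0 : 0 ≤ i) (hrot : combined.rotate i.toNat = x :: xs) :
    PySem.List.pyGetD combined (PySem.Int.mod i (combined.length : Int)) 0 = x := by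
  have hlen : 0 < combined.length := by
    by_contra h
    have : combined = [] := List.eq_nil_of_length_eq_zero (by omega)
    subst this
    simp [List.rotate] at hrot
  have hm : PySem.Int.mod i (combined.length : Int) = i % (combined.length : Int) :=
    PySem.Int.mod_eq_emod_of_pos (by exact_mod_cast hlen)
  have hi : i = ((i.toNat : Nat) : Int) := (Int.toNat_of_nonneg h0).symm
  have hm2 : i % (combined.length : Int) = ((i.toNat % combined.length : Nat) : Int) := by
    rw [hi]; exact_mod_cast (Int.natCast_mod i.toNat combined.length)
  rw [hm, hm2, PySem.List.pyGetD_natCast]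
  have hlt : i.toNat % combined.length < combined.length := Nat.mod_lt _ hlen
  rw [List.getD_eq_getElem _ _ hlt]
  have h0lt : 0 < (combined.rotate i.toNat).length := by
    rw [List.length_rotate]; exact hlen
  have hg := List.getElem_rotate combined i.toNat 0 h0lt
  have h2 : (combined.rotate i.toNat)[0]? = some x := by rw [hrot]; rfl
  rw [List.getElem?_eq_getElem h0lt, hg] at h2
  simpa using h2

-- Sum is invariant under rotation.
lemma sum_rotate_eq (l : List Int) (n : Nat) : (l.rotate n).sum = l.sum :=
  (List.rotate_perm l n).sum_eq

-- The bisimulation: A's deque state is the circular window of B.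
-- q1 ++ q2 is `combined` rotated by `left`, q1 is the window [left, right).
lemma loopA_eq_loopB (fuel : Nat) :
    ∀ (combined q1 q2 : List Int) (n m left right ans : Int),
      0 ≤ left → left ≤ right → right - left ≤ (combined.length : Int) →
      q1 ++ q2 = combined.rotate left.toNat →
      (q1.length : Int) = right - left →
      n + m = (combined.length : Int) →
      0 ≤ combined.sum →
      loopA fuel q1 q2 q1.sum (combined.sum - q1.sum) (n - left) (n + m - right) ans
        = loopB fuel combined n m (n + m) combined.sum q1.sum left right ans := by
  induction fuel with
  | zero =>
    intro combined q1 q2 n m left right ans _ _ _ _ _ _ _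
    simp only [loopA, loopB]
    split_ifs <;> omega
  | succ f ih =>
    intro combined q1 q2 n m left right ans hl hlr hrN hrot hlen hnm hsum
    simp only [loopA, loopB]
    by_cases hg : left ≤ n ∨ right ≤ n + m
    · rw [if_pos (by omega : (0:Int) ≤ n - left ∨ 0 ≤ n + m - right)]
      by_cases heq : 2 * q1.sum = combined.sum
      · rw [if_pos (by omega : q1.sum = combined.sum - q1.sum),
            if_neg (by tauto : ¬((left ≤ n ∨ right ≤ n + m) ∧ 2 * q1.sum ≠ combined.sum)),
            if_pos heq]
      · rw [if_neg (by omega : ¬ q1.sum = combined.sum - q1.sum),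
            if_pos (show (left ≤ n ∨ right ≤ n + m) ∧ 2 * q1.sum ≠ combined.sum from ⟨hg, heq⟩)]
        by_cases hgt : combined.sum < 2 * q1.sum
        · -- A pops from q1, B advances `left`
          rw [if_pos (by omega : q1.sum > combined.sum - q1.sum),
              if_pos (by omega : 2 * q1.sum > combined.sum)]
          cases q1 with
          | nil => simp at hgt; omega
          | cons h t =>
            have hrot' : combined.rotate left.toNat = h :: (t ++ q2) := by
              rw [← hrot]; simp
            have hhead := getD_mod_rotate_head combined left h (t ++ q2) hl hrot'
            rw [show PySem.Int.mod left (n + m) = PySem.Int.mod left (combined.length : Int) by rw [hnm]]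
            rw [hhead]
            have hNpos : 0 < combined.length := by
              have := congrArg List.length hrot'
              simp [List.length_rotate] at this
              omega
            have hrotnew : t ++ (q2 ++ [h]) = combined.rotate (left + 1).toNat := by
              have : (left + 1).toNat = left.toNat + 1 := by omega
              rw [this, ← List.rotate_rotate, hrot']
              simp [List.rotate_cons_succ]
            have hlen' : ((h :: t).length : Int) = right - left := hlen
            have hrec := ih combined t (q2 ++ [h]) n m (left + 1) right (ans + 1)
              (by omega) (by simp at hlen'; omega) (by omega)
              hrotnew (by simp at hlen' ⊢; omega) hnm hsum
            have e1 : (h :: t).sum - h = t.sum := by simp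
            have e2 : combined.sum - (h :: t).sum + h = combined.sum - t.sum := by
              simp; ring
            have e3 : n - left - 1 = n - (left + 1) := by ring
            show loopA f t (q2 ++ [h]) ((h :: t).sum - h) (combined.sum - (h :: t).sum + h)
                (n - left - 1) (n + m - right) (ans + 1) = _
            rw [e1, e2, e3]
            exact hrec
        · -- A pops from q2, B advances `right`
          rw [if_neg (by omega : ¬ q1.sum > combined.sum - q1.sum),
              if_neg (by omega : ¬ 2 * q1.sum > combined.sum)]
          cases q2 with
          | nil =>
            have : q1.sum = combined.sum := by
              have := congrArg List.sum hrot
              simpa [sum_rotate_eq] using this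
            omega
          | cons h t =>
            have hsum2 : q1.sum + (h :: t).sum = combined.sum := by
              have := congrArg List.sum hrot
              simpa [sum_rotate_eq, List.sum_append] using this
            have hlens : q1.length + (h :: t).length = combined.length := by
              have := congrArg List.length hrot
              simpa [List.length_rotate, List.length_append] using this
            have hrotr : combined.rotate right.toNat = h :: (t ++ q1) := by
              have h1 : right.toNat = left.toNat + q1.length := by omega
              rw [h1, ← List.rotate_rotate, ← hrot, List.rotate_append_length_eq]
              simp
            have hhead := getD_mod_rotate_head combined right h (t ++ q1) (by omega) hrotr
            rw [show PySem.Int.mod right (n + m) = PySem.Int.mod right (combined.length : Int) by rw [hnm]]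
            rw [hhead]
            have hrotnew : (q1 ++ [h]) ++ t = combined.rotate left.toNat := by
              rw [← hrot]; simp
            have hrec := ih combined (q1 ++ [h]) t n m left (right + 1) (ans + 1)
              hl (by omega) (by simp at hlens; omega)
              hrotnew (by simp; omega) hnm hsum
            have e1 : q1.sum + h = (q1 ++ [h]).sum := by simp
            have e2 : combined.sum - q1.sum - h = combined.sum - (q1 ++ [h]).sum := by
              simp; ring
            have e3 : n + m - right - 1 = n + m - (right + 1) := by ring
            show loopA f (q1 ++ [h]) t (q1.sum + h) (combined.sum - q1.sum - h)
                (n - left) (n + m - right - 1) (ans + 1) = _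
            rw [e1, e2, e3]
            exact hrec
    · rw [if_neg (by omega : ¬((0:Int) ≤ n - left ∨ 0 ≤ n + m - right)),
          if_neg (by tauto : ¬((left ≤ n ∨ right ≤ n + m) ∧ 2 * q1.sum ≠ combined.sum))]
      split_ifs <;> omega

theorem solution_spec_aux (queue1 queue2 : List Int)
    (hpre : Pre_solution queue1 queue2) :
    solution queue1 queue2 = solution_alt queue1 queue2 := by
  unfold solution solution_alt Pre_solution at *
  have h := loopA_eq_loopB (2 * (queue1.length + queue2.length) + 2)
    (queue1 ++ queue2) queue1 queue2 (queue1.length : Int) (queue2.length : Int)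
    0 (queue1.length : Int) 0
    (by omega) (by omega) (by simp)
    (by simp)
    (by omega)
    (by simp)
    (by simpa using hpre)
  simpa using h

-- ===== VERDICT (by name: the statement is the Claim_ definition above) =====
theorem solution_spec : Claim_equal_solution := by
  intro q1 q2 _ hpre
  exact solution_spec_aux q1 q2 hpre
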